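-- pv_equiv track=rewrite | github.com/marinella2012/PY | hands.py | hands
-- ===== SOURCE A (Python) =====
-- import collections
--
-- def hands(k, line, score):
--     dct = collections.Counter()
--     for i in line:
--         if i.isdigit() is True:
--             dct[i] += 1
--     for i in dct.items():
--         if i[1] <= k * 2:
--             score += 1
--     return score
-- ===== SOURCE B (Python) =====
-- def hands(k, line, score):
--     ds = [c for c in line if c.isdigit()]
--     while ds:
--         c = ds[0]
--         rest = [d for d in ds if d != c]
--         if len(ds) - len(rest) <= 2 * k:
--             score += 1
--         ds = rest
--     return score
-- ===== Notes on version B (the rewrite author's own statement) =====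
-- stated objective: alternative
-- what changed: Replaces the Counter frequency table and the two separate loops with a successive-extraction loop: repeatedly take the first remaining digit, partition it out of the working list, and score its class by the length drop, until the list is empty.
import Mathlib
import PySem

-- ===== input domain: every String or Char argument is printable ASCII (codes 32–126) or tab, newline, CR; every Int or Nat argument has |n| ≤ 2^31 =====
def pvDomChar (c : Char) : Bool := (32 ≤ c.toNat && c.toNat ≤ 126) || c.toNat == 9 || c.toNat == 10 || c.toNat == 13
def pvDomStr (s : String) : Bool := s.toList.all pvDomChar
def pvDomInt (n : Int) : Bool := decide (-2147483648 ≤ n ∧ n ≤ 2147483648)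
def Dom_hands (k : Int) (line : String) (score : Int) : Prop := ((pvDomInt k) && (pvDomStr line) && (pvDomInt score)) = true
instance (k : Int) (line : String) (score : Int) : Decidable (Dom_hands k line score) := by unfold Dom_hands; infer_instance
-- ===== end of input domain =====

-- Header: B drops A's Counter table and its two loops for a successive-extraction loop —
-- repeatedly partition the first remaining digit's occurrences out of the working list and
-- score its class by the length drop (alternative decomposition, same results).

-- ===== PORT A =====
def hands (k : Int) (line : String) (score : Int) : Int :=
  -- dct = Counter();  for i in line: if i.isdigit() is True: dct[i] += 1
  (PySem.Dict.items
      (line.toList.foldl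
        (fun d i => if PySem.Chars.isdigit i = true then d.modify i 0 (· + 1) else d)
        (PySem.Dict.empty : PySem.Dict Char Int))).foldl
    (fun s i => if i.2 ≤ k * 2 then s + 1 else s) score

-- ===== PORT B =====
-- while ds: c = ds[0]; rest = [d for d in ds if d != c]; if len(ds)-len(rest) <= 2*k: score += 1; ds = rest
def hands_alt_go (k : Int) : List Char → Int → Int
  | [], score => score
  | c :: t, score =>
      let rest := (c :: t).filter (fun d => d != c)
      hands_alt_go k rest
        (if ((c :: t).length : Int) - (rest.length : Int) ≤ 2 * k then score + 1 else score)
  termination_by ds _ => ds.length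
  decreasing_by
    simp only [List.filter, bne_self_eq_false, List.length_cons]
    exact Nat.lt_succ_of_le (List.length_filter_le _ _)

def hands_alt (k : Int) (line : String) (score : Int) : Int :=
  -- ds = [c for c in line if c.isdigit()]
  hands_alt_go k (line.toList.filter (fun c => PySem.Chars.isdigit c)) score

-- ===== PRECONDITION & SPEC =====
def Spec_hands (k : Int) (line : String) (score : Int) (out : Int) : Prop := out = hands_alt k line score
instance (k : Int) (line : String) (score : Int) (out : Int) : Decidable (Spec_hands k line score out) := by unfold Spec_hands; infer_instance

-- ===== CLAIM (what is proved, stated in full; the proofs are below) =====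
def Claim_equal_hands : Prop := ∀ (k : Int) (line : String) (score : Int), Dom_hands k line score → Spec_hands k line score (hands k line score)

-- ===== LEMMAS AND PROOFS =====

-- Characterisation of B's loop: it adds one per distinct element whose multiplicity in ds is ≤ 2k.
theorem count_add_filter_ne (c : Char) (l : List Char) :
    l.count c + (l.filter (fun d => d != c)).length = l.length := by
  induction l with
  | nil => simp
  | cons x t ih =>
      by_cases h : x = c
      · subst h
        simp only [List.count_cons_self, List.filter_cons, bne_self_eq_false,
          Bool.false_eq_true, if_false, List.length_cons]
        omega
      · have hb : (x != c) = true := by simpa using h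
        rw [List.count_cons_of_ne h, List.filter_cons, if_pos hb]
        simp only [List.length_cons]
        omega

theorem hands_alt_go_eq (k : Int) : ∀ (ds : List Char) (score : Int),
    hands_alt_go k ds score =
      score + (((PySem.List.dedup ds).countP
        (fun c => decide ((ds.count c : Int) ≤ k * 2)) : Nat) : Int)
  | [], score => by rw [hands_alt_go]; simp
  | c :: t, score => by
      rw [hands_alt_go]
      have hrest : (c :: t).filter (fun d => d != c) = t.filter (fun d => d != c) := by
        simp [List.filter]
      rw [hrest, hands_alt_go_eq k (t.filter (fun d => d != c)) _]
      have hlen := count_add_filter_ne c (c :: t)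
      rw [hrest] at hlen
      -- the distinct elements of c :: t are c together with those of the filtered rest
      have hperm : (PySem.List.dedup (c :: t)).Perm
          (c :: PySem.List.dedup (t.filter (fun d => d != c))) := by
        apply (List.perm_ext_iff_of_nodup (PySem.List.nodup_dedup _) ?_).mpr
        · intro x
          simp only [PySem.List.mem_dedup, List.mem_cons, List.mem_filter, bne_iff_ne]
          by_cases hx : x = c <;> simp [hx]
        · refine List.nodup_cons.mpr ⟨?_, PySem.List.nodup_dedup _⟩
          simp [List.mem_filter]
      rw [hperm.countP_eq, List.countP_cons]
      -- inside the rest, multiplicities agree with those in c :: t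
      have hcong : (PySem.List.dedup (t.filter (fun d => d != c))).countP
            (fun x => decide (((t.filter (fun d => d != c)).count x : Int) ≤ k * 2))
          = (PySem.List.dedup (t.filter (fun d => d != c))).countP
            (fun x => decide (((c :: t).count x : Int) ≤ k * 2)) := by
        apply List.countP_congr
        intro x hx
        have hx' : x ∈ t.filter (fun d => d != c) := (PySem.List.mem_dedup _ _).mp hx
        have hne : (x != c) = true := (List.mem_filter.mp hx').2
        have h1 : (t.filter (fun d => d != c)).count x = t.count x :=
          List.count_filter hne
        have h2 : (c :: t).count x = t.count x :=
          List.count_cons_of_ne (Ne.symm (by simpa using hne))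
        rw [h1, h2]
      rw [hcong]
      by_cases hc : (((c :: t).count c : Int) ≤ k * 2)
      · rw [if_pos (show ((c :: t).length : Int) -
            ((t.filter (fun d => d != c)).length : Int) ≤ 2 * k by omega),
          if_pos (by simpa using hc)]
        push_cast; ring
      · rw [if_neg (show ¬ (((c :: t).length : Int) -
            ((t.filter (fun d => d != c)).length : Int) ≤ 2 * k) by omega),
          if_neg (by simpa using hc)]
        push_cast; ring
  termination_by ds _ => ds.length
  decreasing_by
    exact Nat.lt_succ_of_le (List.length_filter_le _ _)

-- ===== VERDICT (by name: the statement is the Claim_ definition above) =====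
theorem hands_spec : Claim_equal_hands := by
  intro k line score _
  unfold Spec_hands hands hands_alt
  rw [← List.foldl_filter, ← PySem.Dict.counter_eq_foldl,
    PySem.Dict.items_counter, List.foldl_map,
    PySem.List.foldl_ite_add_one (fun c : Char => ((line.toList.filter (fun c => PySem.Chars.isdigit c)).count c : Int) ≤ k * 2),
    hands_alt_go_eq, PySem.List.dedup_eq_ofList]
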